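-- pv_equiv track=rewrite | github.com/matheuscoimbra/restful_flask | util.py | less_common
-- ===== SOURCE A (Python) =====
-- import itertools
-- import operator
--
-- def less_common(L):
--     SL = sorted((x, i) for i, x in enumerate(L))
--     groups = itertools.groupby(SL, key=operator.itemgetter(0))
--
--     def qnt_ind(g):
--         item, iterable = g
--         count = 0
--         min_index = len(L)
--         for _, where in iterable:
--             count += 1
--             min_index = min(min_index, where)
--         return count, -min_index
--
--     return min(groups, key=qnt_ind)[0]
-- ===== SOURCE B (Python) =====
-- def less_common(L):
--     return min(set(L), key=lambda x: (L.count(x), -L.index(x)))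
-- ===== Notes on version B (the rewrite author's own statement) =====
-- stated objective: idiomatic
-- what changed: Replaced the sort-enumerate-groupby frequency pipeline with a single min over the distinct values, rescanning L with count/index as the key; the key (count, -first index) never ties, so set order is irrelevant.
import Mathlib
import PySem

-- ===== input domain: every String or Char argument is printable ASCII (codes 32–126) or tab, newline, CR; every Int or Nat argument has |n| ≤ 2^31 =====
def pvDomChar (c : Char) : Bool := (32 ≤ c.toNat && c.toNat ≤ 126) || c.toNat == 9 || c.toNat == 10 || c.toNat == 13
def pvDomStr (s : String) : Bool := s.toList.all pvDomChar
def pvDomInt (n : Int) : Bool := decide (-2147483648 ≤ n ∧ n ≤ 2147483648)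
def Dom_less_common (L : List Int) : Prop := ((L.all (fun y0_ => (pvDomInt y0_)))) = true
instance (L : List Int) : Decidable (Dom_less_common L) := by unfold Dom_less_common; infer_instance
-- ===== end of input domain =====

-- B replaces A's sort/enumerate/groupby frequency pipeline by one min over the distinct
-- values with the rescanning key (count, -first index); objective: idiomatic.

-- ===== PORT A =====
-- itertools.groupby over the sorted (value, index) pairs: consecutive runs of equal first component
def pyGroupby : List (Int × Int) → List (Int × List (Int × Int))
  | [] => []
  | p :: rest =>
      (p.1, p :: rest.takeWhile (fun q => q.1 == p.1)) ::
        pyGroupby (rest.dropWhile (fun q => q.1 == p.1))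
termination_by l => l.length
decreasing_by
  exact Nat.lt_succ_of_le (List.length_dropWhile_le _ _)

-- the inner helper qnt_ind: count the group's members and take the least index
def qnt_ind (L : List Int) (g : Int × List (Int × Int)) : Int × Int :=
  let r := g.2.foldl (fun (st : Int × Int) p => (st.1 + 1, min st.2 p.2)) (0, PySem.List.len L)
  (r.1, -r.2)

def less_common (L : List Int) : Int :=
  let SL := PySem.List.sorted2
    ((PySem.List.enumerate L).map (fun p => (p.2, p.1))) (fun q => q.1) (fun q => q.2)
  let groups := pyGroupby SL
  match PySem.List.min2? groups (fun g => (qnt_ind L g).1) (fun g => (qnt_ind L g).2) with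
  | some g => g.1
  | none => 0   -- unreachable under Pre_: Python's min raises ValueError on an empty sequence

-- ===== PORT B =====
def less_common_alt (L : List Int) : Int :=
  match PySem.List.min2? (PySem.Set.ofList L)
      (fun x => (PySem.List.count L x : Int))
      (fun x => -(((PySem.List.index? L x).getD 0 : Nat) : Int)) with
  | some m => m
  | none => 0   -- unreachable under Pre_: Python's min raises ValueError on an empty set

-- ===== PRECONDITION & SPEC =====
-- Pre_ excludes only the empty list, on which both A and B raise ValueError (min of an empty sequence).
def Pre_less_common (L : List Int) : Prop := L ≠ []
instance (L : List Int) : Decidable (Pre_less_common L) := by unfold Pre_less_common; infer_instance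
def pvWitness_less_common : List Int := [2, 1, 2]

def Spec_less_common (L : List Int) (out : Int) : Prop := out = less_common_alt L
instance (L : List Int) (out : Int) : Decidable (Spec_less_common L out) := by unfold Spec_less_common; infer_instance

-- ===== CLAIM (what is proved, stated in full; the proofs are below) =====
def Claim_equal_less_common : Prop := ∀ (L : List Int), Dom_less_common L → Pre_less_common L → Spec_less_common L (less_common L)

-- ===== LEMMAS AND PROOFS =====

-- the common key: (occurrence count, negated first-occurrence index), compared lexicographically
def pvKey (L : List Int) (v : Int) : Lex (Int × Int) :=
  toLex ((List.count v L : Int), -((((PySem.List.index? L v).getD 0) : Nat) : Int))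

-- "m is a member of L whose key is strictly below every other member's key"
def pvBest (L : List Int) (m : Int) : Prop :=
  m ∈ L ∧ ∀ y ∈ L, y ≠ m → pvKey L m < pvKey L y

-- the (value, index) pairs of A's generator, with a general start index
def pvPs (L : List Int) (s : Int) : List (Int × Int) :=
  (PySem.List.enumerate L s).map (fun p => (p.2, p.1))

theorem pv_lex_bool (a1 a2 b1 b2 : Int) :
    (decide (a1 < b1) || (!decide (b1 < a1) && decide (a2 < b2)))
      = decide (toLex (a1, a2) < toLex (b1, b2)) := by
  by_cases h1 : a1 < b1 <;> by_cases h2 : b1 < a1 <;> by_cases h3 : a2 < b2 <;>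
    simp [Prod.Lex.lt_iff, h1, h2, h3] <;> omega

-- min with a two-component key is min with the lexicographic key
theorem pv_min2_eq_min {α : Type} (xs : List α) (k1 k2 : α → Int) :
    PySem.List.min2? xs k1 k2 = PySem.List.min? xs (fun x => toLex (k1 x, k2 x)) := by
  unfold PySem.List.min2? PySem.List.min?
  congr 1
  funext acc x
  cases acc with
  | none => rfl
  | some m =>
      simp only [pv_lex_bool (k1 x) (k2 x) (k1 m) (k2 m)]
      by_cases h : toLex (k1 x, k2 x) < toLex (k1 m, k2 m) <;> simp [h]

-- sorting with a two-component key is sorting with the lexicographic key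
theorem pv_sorted2_eq_sorted {α : Type} (xs : List α) (k1 k2 : α → Int) :
    PySem.List.sorted2 xs k1 k2 = PySem.List.sorted xs (fun x => toLex (k1 x, k2 x)) := by
  unfold PySem.List.sorted2 PySem.List.sorted
  simp only [if_neg (by decide : ¬ (false = true))]
  congr 1
  funext acc x
  congr 1
  funext a b
  exact pv_lex_bool (k1 a) (k2 a) (k1 b) (k2 b)

-- the first-occurrence index of a member: exists, is in range, and the list holds v there
theorem pv_index?_spec {L : List Int} {v : Int} (hv : v ∈ L) :
    ∃ k, PySem.List.index? L v = some k ∧ ∃ hk : k < L.length, L[k] = v := by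
  obtain ⟨k, hk⟩ := Option.isSome_iff_exists.mp ((PySem.List.index?_isSome_iff L v).mpr hv)
  obtain ⟨hlt, hget, -⟩ := PySem.List.getElem_of_index?_eq_some hk
  exact ⟨k, hk, hlt, hget⟩

-- the key is injective on members: equal second components mean equal first-occurrence index
theorem pv_key_inj (L : List Int) {x y : Int} (hx : x ∈ L) (hy : y ∈ L)
    (h : pvKey L x = pvKey L y) : x = y := by
  obtain ⟨kx, hkx, hltx, hgx⟩ := pv_index?_spec hx
  obtain ⟨ky, hky, hlty, hgy⟩ := pv_index?_spec hy
  have h2 := congrArg (fun z => (ofLex z).2) h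
  simp only [pvKey, hkx, hky, ofLex_toLex, Option.getD_some] at h2
  have : kx = ky := by omega
  rw [← hgx, ← hgy]
  simp [this]

theorem pv_best_unique {L : List Int} {a b : Int} (ha : pvBest L a) (hb : pvBest L b) : a = b := by
  by_contra hne
  exact absurd (ha.2 b hb.1 (Ne.symm hne)) (not_lt_of_gt (hb.2 a ha.1 hne))

theorem pvPs_cons (x : Int) (t : List Int) (s : Int) :
    pvPs (x :: t) s = (x, s) :: pvPs t (s + 1) := by
  simp [pvPs, PySem.List.enumerate_cons]

theorem pvPs_nil (s : Int) : pvPs [] s = [] := by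
  simp [pvPs, PySem.List.enumerate]

theorem pv_mem_fst {L : List Int} {s : Int} {p : Int × Int} (h : p ∈ pvPs L s) : p.1 ∈ L := by
  induction L generalizing s with
  | nil => simp [pvPs_nil] at h
  | cons x t ih =>
      rw [pvPs_cons] at h
      rcases List.mem_cons.mp h with h | h
      · simp [h]
      · exact List.mem_cons_of_mem _ (ih h)

theorem pv_mem_snd_ge {L : List Int} {s : Int} {p : Int × Int} (h : p ∈ pvPs L s) : s ≤ p.2 := by
  induction L generalizing s with
  | nil => simp [pvPs_nil] at h
  | cons x t ih =>
      rw [pvPs_cons] at h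
      rcases List.mem_cons.mp h with h | h
      · simp [h]
      · have := ih h; omega

theorem pv_mem_of_mem {L : List Int} {v : Int} (h : v ∈ L) (s : Int) : ∃ i, (v, i) ∈ pvPs L s := by
  induction L generalizing s with
  | nil => simp at h
  | cons x t ih =>
      rcases List.mem_cons.mp h with rfl | h
      · exact ⟨s, by rw [pvPs_cons]; exact List.mem_cons_self⟩
      · obtain ⟨i, hi⟩ := ih h (s + 1)
        exact ⟨i, by rw [pvPs_cons]; exact List.mem_cons_of_mem _ hi⟩

theorem pv_nodup (L : List Int) (s : Int) : (pvPs L s).Nodup := by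
  induction L generalizing s with
  | nil => simp [pvPs_nil]
  | cons x t ih =>
      rw [pvPs_cons]
      refine List.nodup_cons.mpr ⟨fun hmem => ?_, ih (s + 1)⟩
      have := pv_mem_snd_ge hmem
      simp at this

-- the paired fold of qnt_ind splits into a length count and a running min
theorem pv_fold_split (l : List (Int × Int)) (c mi : Int) :
    l.foldl (fun (st : Int × Int) p => (st.1 + 1, min st.2 p.2)) (c, mi)
      = (c + l.length, l.foldl (fun (a : Int) p => min a p.2) mi) := by
  induction l generalizing c mi with
  | nil => simp
  | cons p t ih => simp [List.foldl_cons, ih]; omega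

-- number of pairs carrying value v = count of v in L
theorem pv_E1 (L : List Int) (s v : Int) :
    ((pvPs L s).filter (fun q => q.1 == v)).length = List.count v L := by
  induction L generalizing s with
  | nil => simp [pvPs_nil]
  | cons x t ih =>
      rw [pvPs_cons]
      by_cases hx : x = v <;> simp [hx, ih]

-- a running min already at or below every remaining index never moves
theorem pv_E3 (L : List Int) (v : Int) {s m : Int} (hm : m ≤ s) :
    ((pvPs L s).filter (fun q => q.1 == v)).foldl (fun (a : Int) p => min a p.2) m = m := by
  induction L generalizing s with
  | nil => simp [pvPs_nil]
  | cons x t ih =>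
      rw [pvPs_cons]
      by_cases hx : x = v <;> simp [hx]
      · rw [min_eq_left hm]; exact ih (by omega)
      · exact ih (by omega)

-- the running min over the matching pairs lands on the first-occurrence index
theorem pv_E2 (L : List Int) (v : Int) {s m : Int} {k : Nat}
    (hk : PySem.List.index? L v = some k) (hm : s + k ≤ m) :
    ((pvPs L s).filter (fun q => q.1 == v)).foldl (fun (a : Int) p => min a p.2) m = s + k := by
  induction L generalizing s m k with
  | nil => simp [PySem.List.index?] at hk
  | cons x t ih =>
      rw [pvPs_cons]
      by_cases hx : x = v
      · subst hx
        rw [PySem.List.index?_cons_self] at hk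
        obtain rfl : (0 : Nat) = k := Option.some.inj hk
        simp only [List.filter_cons, BEq.rfl, if_pos, List.foldl_cons]
        rw [min_eq_right (by omega : s ≤ m)]
        rw [pv_E3 t _ (by omega : s ≤ s + 1)]
        omega
      · rw [PySem.List.index?_cons_of_ne t hx] at hk
        cases hk' : PySem.List.index? t v with
        | none => rw [hk'] at hk; simp at hk
        | some k' =>
            rw [hk'] at hk
            simp at hk
            simp [hx]
            rw [ih hk' (by omega)]
            omega

theorem pv_groupby_flat (l : List (Int × Int)) :
    (pyGroupby l).flatMap (fun g => g.2) = l := by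
  induction l using pyGroupby.induct with
  | case1 => simp [pyGroupby]
  | case2 p rest ih =>
      rw [pyGroupby]
      simp only [List.flatMap_cons, ih]
      simp [List.takeWhile_append_dropWhile]

-- the head of a dropWhile fails the predicate
theorem pv_dropWhile_head_false {α : Type} {pr : α → Bool} {l : List α} {q : α} {t : List α}
    (h : l.dropWhile pr = q :: t) : pr q = false := by
  induction l generalizing t with
  | nil => simp at h
  | cons a l ih =>
      rw [List.dropWhile_cons] at h
      by_cases hp : pr a = true
      · exact ih (by simpa [hp] using h)
      · simp [hp] at h
        rw [← h.1]
        simpa using hp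

-- elements strictly after the current run carry a strictly larger value
theorem pv_rest'_gt {p : Int × Int} {rest : List (Int × Int)}
    (hle : ∀ x ∈ rest, p.1 ≤ x.1)
    (hpw : rest.Pairwise (fun a b => a.1 ≤ b.1)) :
    ∀ x ∈ rest.dropWhile (fun q => q.1 == p.1), p.1 < x.1 := by
  intro x hx
  cases hd : rest.dropWhile (fun q => q.1 == p.1) with
  | nil => rw [hd] at hx; simp at hx
  | cons q t =>
      have hqf : (q.1 == p.1) = false := pv_dropWhile_head_false (pr := fun (r : Int × Int) => r.1 == p.1) hd
      have hq : q ∈ rest := (List.dropWhile_sublist _).mem (hd ▸ List.mem_cons_self)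
      have hpq : p.1 < q.1 := lt_of_le_of_ne (hle q hq) (by simpa using Ne.symm (by simpa using hqf))
      rw [hd] at hx
      rcases List.mem_cons.mp hx with rfl | hx
      · exact hpq
      · have hpw' : (q :: t).Pairwise (fun a b => a.1 ≤ b.1) :=
          List.Pairwise.sublist (hd ▸ (List.dropWhile_sublist _)) hpw
        exact lt_of_lt_of_le hpq ((List.pairwise_cons.mp hpw').1 x hx)

-- groupby of a run-ordered list: each group is a nonempty contiguous piece holding
-- exactly the elements of the list whose first component is the group's value
theorem pv_groupby_props (l : List (Int × Int)) (h : l.Pairwise (fun a b => a.1 ≤ b.1)) :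
    ∀ g ∈ pyGroupby l, g.2.Sublist l ∧ g.2 ≠ [] ∧ (∀ x, x ∈ g.2 ↔ (x ∈ l ∧ x.1 = g.1)) := by
  induction l using pyGroupby.induct with
  | case1 => simp [pyGroupby]
  | case2 p rest ih =>
      intro g hg
      obtain ⟨hle, hpw⟩ := List.pairwise_cons.mp h
      have hgt := pv_rest'_gt hle hpw
      have hsplit : rest.takeWhile (fun q => q.1 == p.1) ++ rest.dropWhile (fun q => q.1 == p.1) = rest :=
        List.takeWhile_append_dropWhile
      rw [pyGroupby] at hg
      rcases List.mem_cons.mp hg with rfl | hg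
      · refine ⟨?_, by simp, ?_⟩
        · have : (p :: rest.takeWhile (fun q => q.1 == p.1)) = List.takeWhile (fun q => q.1 == p.1) (p :: rest) := by
            simp
          rw [this]; exact List.takeWhile_sublist _
        · intro x
          constructor
          · intro hx
            rcases List.mem_cons.mp hx with rfl | hx
            · exact ⟨List.mem_cons_self, rfl⟩
            · exact ⟨List.mem_cons_of_mem _ ((List.takeWhile_sublist _).mem hx),
                by simpa using List.mem_takeWhile_imp hx⟩
          · rintro ⟨hxl, hxv⟩
            rcases List.mem_cons.mp hxl with rfl | hxl
            · exact List.mem_cons_self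
            · rw [← hsplit] at hxl
              rcases List.mem_append.mp hxl with hx | hx
              · exact List.mem_cons_of_mem _ hx
              · exact absurd (hgt x hx) (by simp [hxv])
      · obtain ⟨hsub, hne, hiff⟩ := ih
          (List.Pairwise.sublist (List.dropWhile_sublist _) hpw) g hg
        have hsub' : g.2.Sublist (p :: rest) :=
          hsub.trans ((List.dropWhile_sublist _).trans (List.sublist_cons_self _ _))
        refine ⟨hsub', hne, fun x => ?_⟩
        obtain ⟨w, hw⟩ := List.exists_mem_of_ne_nil _ hne
        have hwr := (hiff w).mp hw
        have hpg : p.1 < g.1 := hwr.2 ▸ hgt w hwr.1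
        constructor
        · intro hx
          have := (hiff x).mp hx
          exact ⟨List.mem_cons_of_mem _ ((List.dropWhile_sublist _).mem this.1), this.2⟩
        · rintro ⟨hxl, hxv⟩
          rcases List.mem_cons.mp hxl with rfl | hxl
          · exact absurd hpg (by simp [hxv])
          · rw [← hsplit] at hxl
            rcases List.mem_append.mp hxl with hx | hx
            · have : x.1 = p.1 := by simpa using List.mem_takeWhile_imp hx
              omega
            · exact (hiff x).mpr ⟨hx, hxv⟩

-- B's min-with-key argument equals the common key
theorem pv_alt_key (L : List Int) (x : Int) :
    toLex ((PySem.List.count L x : Int), -(((PySem.List.index? L x).getD 0 : Nat) : Int)) = pvKey L x := by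
  simp [pvKey, PySem.List.count_eq]

theorem pv_alt_best {L : List Int} (h : L ≠ []) : pvBest L (less_common_alt L) := by
  unfold less_common_alt
  rw [pv_min2_eq_min]
  cases hmin : PySem.List.min? (PySem.Set.ofList L)
      (fun x => toLex ((PySem.List.count L x : Int), -(((PySem.List.index? L x).getD 0 : Nat) : Int))) with
  | none =>
      exfalso
      have hnil := (PySem.List.min?_eq_none_iff _ _).mp hmin
      obtain ⟨x, hx⟩ := List.exists_mem_of_ne_nil L h
      exact absurd ((PySem.Set.mem_ofList L x).mpr hx) (by simp [hnil])
  | some m =>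
      simp only
      have hmem : m ∈ L := (PySem.Set.mem_ofList L m).mp (PySem.List.min?_mem hmin)
      refine ⟨hmem, fun y hy hne => ?_⟩
      have hle := PySem.List.min?_isMin hmin y ((PySem.Set.mem_ofList L y).mpr hy)
      rw [pv_alt_key, pv_alt_key] at hle
      exact lt_of_le_of_ne hle (fun he => hne (pv_key_inj L hy hmem he.symm))

theorem pv_a_best {L : List Int} (h : L ≠ []) : pvBest L (less_common L) := by
  show pvBest L
    (match PySem.List.min2?
        (pyGroupby (PySem.List.sorted2 (pvPs L 0) (fun q => q.1) (fun q => q.2)))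
        (fun g => (qnt_ind L g).1) (fun g => (qnt_ind L g).2) with
     | some g => g.1
     | none => 0)
  rw [pv_min2_eq_min, pv_sorted2_eq_sorted]
  set SL := PySem.List.sorted (pvPs L 0) (fun q => toLex (q.1, q.2)) with hSL
  have hperm : SL.Perm (pvPs L 0) := PySem.List.sorted_perm _ _ _
  have hpw : SL.Pairwise (fun a b => a.1 ≤ b.1) := by
    have := PySem.List.sorted_pairwise (pvPs L 0) (fun q => toLex (q.1, q.2))
    exact this.imp (fun hab => by
      rcases Prod.Lex.le_iff.mp hab with h1 | h1
      · exact le_of_lt h1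
      · exact le_of_eq h1.1)
  have hnd : SL.Nodup := (hperm.nodup_iff).mpr (pv_nodup L 0)
  have hprops := pv_groupby_props SL hpw
  -- each group's key is the common key of its value
  have hkey : ∀ g ∈ pyGroupby SL, g.1 ∈ L ∧
      toLex ((qnt_ind L g).1, (qnt_ind L g).2) = pvKey L g.1 := by
    intro g hg
    obtain ⟨hsub, hne, hiff⟩ := hprops g hg
    obtain ⟨w, hw⟩ := List.exists_mem_of_ne_nil _ hne
    have hwSL := hsub.mem hw
    have hv : g.1 ∈ L := ((hiff w).mp hw).2 ▸ pv_mem_fst (hperm.mem_iff.mp hwSL)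
    refine ⟨hv, ?_⟩
    obtain ⟨k, hk, hklt, -⟩ := pv_index?_spec hv
    have hgperm : g.2.Perm ((pvPs L 0).filter (fun q => q.1 == g.1)) := by
      refine (List.perm_ext_iff_of_nodup (hnd.sublist hsub) ((pv_nodup L 0).filter _)).mpr ?_
      intro x
      rw [hiff x, List.mem_filter]
      constructor
      · rintro ⟨hx, hv⟩; exact ⟨hperm.mem_iff.mp hx, by simp [hv]⟩
      · rintro ⟨hx, hv⟩; exact ⟨hperm.mem_iff.mpr hx, by simpa using hv⟩
    haveI : RightCommutative (fun (a : Int) (p : Int × Int) => min a p.2) :=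
      ⟨fun b a₁ a₂ => by simp [min_right_comm]⟩
    have hfold := hgperm.foldl_eq (f := fun (a : Int) (p : Int × Int) => min a p.2) (PySem.List.len L)
    unfold qnt_ind
    rw [pv_fold_split]
    simp only [hfold, hgperm.length_eq, pv_E1 L 0 g.1]
    rw [pv_E2 L g.1 hk (by simp [PySem.List.len_eq]; omega)]
    simp only [pvKey, hk, Option.getD_some]
    norm_num
  -- the min over the groups is the best member of L
  cases hmin : PySem.List.min? (pyGroupby SL) (fun g => toLex ((qnt_ind L g).1, (qnt_ind L g).2)) with
  | none =>
      exfalso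
      have hnil := (PySem.List.min?_eq_none_iff _ _).mp hmin
      obtain ⟨x, hx⟩ := List.exists_mem_of_ne_nil L h
      obtain ⟨i, hi⟩ := pv_mem_of_mem hx 0
      have : (x, i) ∈ SL := hperm.mem_iff.mpr hi
      rw [← pv_groupby_flat SL, hnil] at this
      simp at this
  | some g0 =>
      simp only
      have hg0 := PySem.List.min?_mem hmin
      obtain ⟨hg0L, hg0key⟩ := hkey g0 hg0
      refine ⟨hg0L, fun y hy hne => ?_⟩
      obtain ⟨i, hi⟩ := pv_mem_of_mem hy 0
      have hySL : (y, i) ∈ SL := hperm.mem_iff.mpr hi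
      rw [← pv_groupby_flat SL] at hySL
      obtain ⟨gy, hgy, hygy⟩ := List.mem_flatMap.mp hySL
      obtain ⟨-, -, hiffy⟩ := hprops gy hgy
      have hgy1 : gy.1 = y := (((hiffy _).mp hygy).2).symm
      obtain ⟨-, hgykey⟩ := hkey gy hgy
      have hle := PySem.List.min?_isMin hmin gy hgy
      rw [hg0key, hgykey, hgy1] at hle
      exact lt_of_le_of_ne hle (fun he => hne (pv_key_inj L hy hg0L he.symm))

-- ===== VERDICT (by name: the statement is the Claim_ definition above) =====
theorem less_common_spec : Claim_equal_less_common := by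
  intro L _ hpre
  show less_common L = less_common_alt L
  exact pv_best_unique (pv_a_best hpre) (pv_alt_best hpre)
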